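-- pv_equiv track=rewrite | github.com/Adamssss/projectEuler | Problem 001-150 Python/pb147.py | dgm
-- ===== SOURCE A (Python) =====
-- def chg(m,n):
--     '''
--     total = 0
--     for i in range(1,n+1):
--         for j in range(1,m+1):
--             total += i*j
--     return total
--     '''
--     return m*(m+1)*n*(n+1)//4
--
-- def cdg(m,n):
--     '''
--     total = 0
--     tset = []
--     for i in range(1,n):
--         tset.append(2*i)
--     for i in range(m-n):
--         tset.append(2*n-1)
--     for i in range(n-1,0,-1):
--         tset.append(2*i)
--     for i in range(1,m+n-1):
--         for j in range(0,len(tset)-i+1):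
--             if m > n:
--                 k = min(min(tset[j:j+i]),max(tset[j:j+i])+1-i)
--             else:
--                 k = min(tset[j:j+i])
--             if k > 0:
--                     total += k*(k+1)//2
--     return total
--     '''
--     return n*((2*m-n)*(4*n*n-1)-3)//6
--
-- def dg(m,n):
--     return chg(m,n)+cdg(m,n)
--
-- def dgm(m,n):
--     total = 0
--     for i in range(1,m+1):
--         for j in range(1,n+1):
--             if i >= j:
--                 total += dg(i,j)
--             else:
--                 total += dg(j,i)
--     return total
-- ===== SOURCE B (Python) =====
-- def dgm(m, n):
--     # Closed form: the double sum collapses to a degree-6 polynomial in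
--     # (a, b) = (max(m, n), min(m, n)); empty grid gives 0.
--     if m < 1 or n < 1:
--         return 0
--     a, b = (m, n) if m >= n else (n, m)
--     diag = 17*b**6 + 66*b**5 + 95*b**4 + 30*b**3 - 22*b**2 - 6*b
--     rect = (5*a**3*b**3 + 15*a**3*b**2 + 10*a**3*b
--             + 30*a**2*b**4 + 75*a**2*b**3 + 60*a**2*b**2 + 15*a**2*b
--             - 24*a*b**5 - 30*a*b**4 + 40*a*b**3 + 15*a*b**2 - 31*a*b
--             - 11*b**6 - 60*b**5 - 110*b**4 - 30*b**3 + 31*b**2)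
--     return (diag + rect) // 180
-- ===== Notes on version B (the rewrite author's own statement) =====
-- stated objective: faster
-- what changed: Replaced the O(m*n) double loop over all grid cells by a closed-form degree-6 polynomial in (max(m,n), min(m,n)), derived by summing the per-cell polynomial with power-sum formulas.
import Mathlib
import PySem

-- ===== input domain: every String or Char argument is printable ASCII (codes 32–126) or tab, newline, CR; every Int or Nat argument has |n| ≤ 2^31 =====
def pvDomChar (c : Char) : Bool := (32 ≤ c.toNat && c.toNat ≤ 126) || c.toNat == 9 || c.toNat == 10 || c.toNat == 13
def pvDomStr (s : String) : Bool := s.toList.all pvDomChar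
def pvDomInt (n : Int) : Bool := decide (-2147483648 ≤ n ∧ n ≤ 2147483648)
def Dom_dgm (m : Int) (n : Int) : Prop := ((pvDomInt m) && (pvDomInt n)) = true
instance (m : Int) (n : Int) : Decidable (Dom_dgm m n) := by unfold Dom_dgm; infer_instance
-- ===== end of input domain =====

-- B replaces A's O(m*n) double loop by a closed-form degree-6 polynomial in (max(m,n), min(m,n)) (objective: faster).

-- ===== PORT A =====
def chgA (m : Int) (n : Int) : Int := PySem.Int.floordiv (m*(m+1)*n*(n+1)) 4

def cdgA (m : Int) (n : Int) : Int := PySem.Int.floordiv (n*((2*m-n)*(4*n*n-1)-3)) 6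

def dgA (m : Int) (n : Int) : Int := chgA m n + cdgA m n

def dgm (m : Int) (n : Int) : Int :=
  (PySem.List.pyRange 1 (m+1) 1).foldl (fun total i =>
    (PySem.List.pyRange 1 (n+1) 1).foldl (fun total j =>
      if i ≥ j then total + dgA i j else total + dgA j i) total) 0

-- ===== PORT B =====
def dgm_alt (m : Int) (n : Int) : Int :=
  if m < 1 ∨ n < 1 then 0
  else
    let a := if m ≥ n then m else n
    let b := if m ≥ n then n else m
    let diag := 17*b^6 + 66*b^5 + 95*b^4 + 30*b^3 - 22*b^2 - 6*b
    let rect := 5*a^3*b^3 + 15*a^3*b^2 + 10*a^3*b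
                + 30*a^2*b^4 + 75*a^2*b^3 + 60*a^2*b^2 + 15*a^2*b
                - 24*a*b^5 - 30*a*b^4 + 40*a*b^3 + 15*a*b^2 - 31*a*b
                - 11*b^6 - 60*b^5 - 110*b^4 - 30*b^3 + 31*b^2
    PySem.Int.floordiv (diag + rect) 180

-- ===== PRECONDITION & SPEC =====
def Spec_dgm (m : Int) (n : Int) (out : Int) : Prop := out = dgm_alt m n
instance (m : Int) (n : Int) (out : Int) : Decidable (Spec_dgm m n out) := by unfold Spec_dgm; infer_instance

-- ===== CLAIM (what is proved, stated in full; the proofs are below) =====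
def Claim_equal_dgm : Prop := ∀ (m : Int) (n : Int), Dom_dgm m n → Spec_dgm m n (dgm m n)

-- ===== LEMMAS AND PROOFS =====

-- 12 * dg(a,b), as one integer polynomial (both floor divisions in dg are exact)
def pP (a : Int) (b : Int) : Int := 3*a*(a+1)*b*(b+1) + 2*(b*((2*a-b)*(4*b*b-1)-3))

-- 15 * Σ_{j=1..n} pP(i,j)
def p1 (i : Int) (n : Int) : Int :=
  -24*n^5 + 60*n^4*i - 60*n^4 + 15*n^3*i^2 + 135*n^3*i - 30*n^3
  + 45*n^2*i^2 + 75*n^2*i - 30*n^2 + 30*n*i^2 - 36*n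

-- 15 * Σ_{j=i+1..n} pP(j,i)
def p2 (i : Int) (n : Int) : Int :=
  15*n^3*i^2 + 15*n^3*i + 120*n^2*i^3 + 45*n^2*i^2 + 15*n^2*i
  - 120*n*i^4 + 120*n*i^3 + 60*n*i^2 - 90*n*i - 15*i^5 - 180*i^4 - 75*i^3 + 90*i^2

-- 15 * Σ_{i=1..m} (p1(i,i)/15 + p2(i,n)/15), valid for m ≤ n
def q1 (m : Int) (n : Int) : Int :=
  6*m^6 - 24*m^5*n + 6*m^5 + 30*m^4*n^2 - 30*m^4*n - 15*m^4 + 5*m^3*n^3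
  + 75*m^3*n^2 + 40*m^3*n + 15*m^2*n^3 + 60*m^2*n^2 + 15*m^2*n + 9*m^2
  + 10*m*n^3 + 15*m*n^2 - 31*m*n - 6*m

-- 15 * Σ_{i=n+1..m} p1(i,n)/15
def q2 (m : Int) (n : Int) : Int :=
  5*m^3*n^3 + 15*m^3*n^2 + 10*m^3*n + 30*m^2*n^4 + 75*m^2*n^3 + 60*m^2*n^2
  + 15*m^2*n - 24*m*n^5 - 30*m*n^4 + 40*m*n^3 + 15*m*n^2 - 31*m*n
  - 11*n^6 - 60*n^5 - 110*n^4 - 30*n^3 + 31*n^2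

def gfun (i : Int) (j : Int) : Int := if i ≥ j then dgA i j else dgA j i

def rowSum (i : Int) (n : Int) : Int := ((PySem.List.pyRange 1 (n+1) 1).map (gfun i)).sum

-- the two exact divisions inside dg
theorem dg12 (a : Int) (b : Int) : 12 * dgA a b = pP a b := by
  obtain ⟨u, hu⟩ := Int.even_mul_succ_self a
  obtain ⟨v, hv⟩ := Int.even_mul_succ_self b
  have hX : a*(a+1)*b*(b+1) = 4*(u*v) := by linear_combination (b*(b+1))*hu + (2*u)*hv
  have hchg : chgA a b = u*v := by
    unfold chgA
    rw [hX, PySem.Int.floordiv_eq_ediv_of_pos (by norm_num)]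
    exact Int.mul_ediv_cancel_left _ (by norm_num)
  have h2 : (2:ℤ) ∣ b*((2*a-b)*(4*b*b-1)-3) := by
    rcases Int.even_or_odd b with ⟨u2, hb⟩ | ⟨u2, hb⟩
    · subst hb
      exact ⟨u2*((2*a-(u2+u2))*(4*(u2+u2)*(u2+u2)-1)-3), by ring⟩
    · subst hb
      exact ⟨32*a*u2^3 + 48*a*u2^2 + 22*a*u2 + 3*a - 32*u2^4 - 64*u2^3 - 46*u2^2 - 17*u2 - 3, by ring⟩
  have h3 : (3:ℤ) ∣ b*((2*a-b)*(4*b*b-1)-3) := by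
    have hr : b % 3 = 0 ∨ b % 3 = 1 ∨ b % 3 = 2 := by omega
    rcases hr with hr | hr | hr
    · obtain ⟨q, hq⟩ : ∃ q, b = 3*q := ⟨b / 3, by omega⟩
      subst hq
      exact ⟨72*a*q^3 - 2*a*q - 108*q^4 + 3*q^2 - 3*q, by ring⟩
    · obtain ⟨q, hq⟩ : ∃ q, b = 3*q + 1 := ⟨b / 3, by omega⟩
      subst hq
      exact ⟨72*a*q^3 + 72*a*q^2 + 22*a*q + 2*a - 108*q^4 - 144*q^3 - 69*q^2 - 17*q - 2, by ring⟩
    · obtain ⟨q, hq⟩ : ∃ q, b = 3*q + 2 := ⟨b / 3, by omega⟩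
      subst hq
      exact ⟨72*a*q^3 + 144*a*q^2 + 94*a*q + 20*a - 108*q^4 - 288*q^3 - 285*q^2 - 127*q - 22, by ring⟩
  have h6 : (6:ℤ) ∣ b*((2*a-b)*(4*b*b-1)-3) := by
    have hc : IsCoprime (2:ℤ) 3 := ⟨-1, 1, by ring⟩
    exact (by norm_num : (6:ℤ) = 2*3) ▸ hc.mul_dvd h2 h3
  obtain ⟨w, hw⟩ := h6
  have hcdg : cdgA a b = w := by
    unfold cdgA
    rw [hw, PySem.Int.floordiv_eq_ediv_of_pos (by norm_num)]
    exact Int.mul_ediv_cancel_left _ (by norm_num)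
  unfold dgA pP
  rw [hchg, hcdg]
  linear_combination -3*hX - 2*hw

-- polynomial identities used as building blocks (all pure `ring` facts)
theorem p1_zero (i : Int) : p1 i 0 = 0 := by unfold p1; ring
theorem p2_self (i : Int) : p2 i i = 0 := by unfold p2; ring
theorem p1_step (i : Int) (n : Int) : p1 i (n+1) = p1 i n + 15 * pP i (n+1) := by
  unfold p1 pP; ring
theorem p2_step (i : Int) (n : Int) : p2 i (n+1) = p2 i n + 15 * pP (n+1) i := by
  unfold p2 pP; ring
theorem q1_zero (n : Int) : q1 0 n = 0 := by unfold q1; ring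
theorem q1_step (m : Int) (n : Int) : q1 (m+1) n = q1 m n + p1 (m+1) (m+1) + p2 (m+1) n := by
  unfold q1 p1 p2; ring
theorem q1_diag_glue (m : Int) : q1 (m+1) (m+1) = q1 m (m+1) + p1 (m+1) (m+1) := by
  unfold q1 p1; ring
theorem q2_step (m : Int) (n : Int) : q2 (m+1) n = q2 m n + p1 (m+1) n := by
  unfold q2 p1; ring
theorem q2_self (n : Int) : q2 n n = 0 := by unfold q2; ring
theorem q2_succ_self (n : Int) : q2 (n+1) n = p1 (n+1) n := by unfold q2 p1; ring
theorem q1_sym (m : Int) (n : Int) : q1 m n = q1 m m + q2 n m := by unfold q1 q2; ring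
theorem numB_eq (a : Int) (b : Int) :
    (17*b^6 + 66*b^5 + 95*b^4 + 30*b^3 - 22*b^2 - 6*b)
    + (5*a^3*b^3 + 15*a^3*b^2 + 10*a^3*b
       + 30*a^2*b^4 + 75*a^2*b^3 + 60*a^2*b^2 + 15*a^2*b
       - 24*a*b^5 - 30*a*b^4 + 40*a*b^3 + 15*a*b^2 - 31*a*b
       - 11*b^6 - 60*b^5 - 110*b^4 - 30*b^3 + 31*b^2) = q1 b b + q2 a b := by
  unfold q1 q2; ring

-- A's nested foldl as a sum of row sums
theorem dgm_eq_sum (m : Int) (n : Int) :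
    dgm m n = ((PySem.List.pyRange 1 (m+1) 1).map (fun i => rowSum i n)).sum := by
  unfold dgm
  have h1 : (fun (total i : Int) =>
      (PySem.List.pyRange 1 (n+1) 1).foldl
        (fun total j => if i ≥ j then total + dgA i j else total + dgA j i) total)
      = fun total i => total + rowSum i n := by
    funext total i
    have hbody : (fun (t j : Int) => if i ≥ j then t + dgA i j else t + dgA j i)
        = fun t j => t + gfun i j := by
      funext t j
      unfold gfun
      by_cases h : i ≥ j <;> simp [h]
    rw [hbody, PySem.List.foldl_add]
    rfl
  rw [h1, PySem.List.foldl_add]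
  simp

theorem innerClosedNat (i : Int) (k : Nat) (hi : 1 ≤ i) :
    180 * rowSum i (k:Int) = if (k:Int) ≤ i then p1 i (k:Int) else p1 i i + p2 i (k:Int) := by
  induction k with
  | zero =>
      have hnil : PySem.List.pyRange 1 (((0:Nat):Int)+1) 1 = [] := by
        push_cast
        exact PySem.List.pyRange_one_eq_nil (by norm_num)
      rw [if_pos (by push_cast; omega)]
      unfold rowSum
      rw [hnil]
      simpa using (p1_zero i).symm
  | succ k ih =>
      have hsplit : PySem.List.pyRange 1 (((k+1:Nat):Int)+1) 1
          = PySem.List.pyRange 1 ((k:Int)+1) 1 ++ [(k:Int)+1] := by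
        push_cast
        exact PySem.List.pyRange_one_succ_right (by omega)
      have hrow : rowSum i ((k+1:Nat):Int) = rowSum i (k:Int) + gfun i ((k:Int)+1) := by
        unfold rowSum
        rw [hsplit]
        simp
      rw [hrow]
      push_cast
      by_cases h : (k:Int)+1 ≤ i
      · rw [if_pos h]
        rw [if_pos (by omega : (k:Int) ≤ i)] at ih
        have hg : gfun i ((k:Int)+1) = dgA i ((k:Int)+1) := if_pos h
        rw [hg, p1_step]
        linear_combination ih + 15 * dg12 i ((k:Int)+1)
      · rw [if_neg h]
        have hg : gfun i ((k:Int)+1) = dgA ((k:Int)+1) i := if_neg h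
        rw [hg, p2_step]
        by_cases h2 : (k:Int) ≤ i
        · have hik : i = (k:Int) := by omega
          subst hik
          rw [if_pos le_rfl] at ih
          rw [p2_self]
          linear_combination ih + 15 * dg12 ((k:Int)+1) (k:Int)
        · rw [if_neg h2] at ih
          linear_combination ih + 15 * dg12 ((k:Int)+1) i

theorem innerClosed (i : Int) (n : Int) (hi : 1 ≤ i) (hn : 0 ≤ n) :
    180 * rowSum i n = if n ≤ i then p1 i n else p1 i i + p2 i n := by
  obtain ⟨k, rfl⟩ : ∃ k : Nat, n = (k:Int) := ⟨n.toNat, by omega⟩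
  exact innerClosedNat i k hi

theorem outerClosedNat (k : Nat) (n : Int) (hn : 1 ≤ n) :
    180 * ((PySem.List.pyRange 1 ((k:Int)+1) 1).map (fun i => rowSum i n)).sum
      = if (k:Int) ≤ n then q1 (k:Int) n else q1 n n + q2 (k:Int) n := by
  induction k with
  | zero =>
      push_cast
      rw [if_pos (by omega),
        show PySem.List.pyRange 1 1 1 = [] from PySem.List.pyRange_one_eq_nil le_rfl]
      simpa using (q1_zero n).symm
  | succ k ih =>
      have hsplit : PySem.List.pyRange 1 (((k+1:Nat):Int)+1) 1
          = PySem.List.pyRange 1 ((k:Int)+1) 1 ++ [(k:Int)+1] := by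
        push_cast
        exact PySem.List.pyRange_one_succ_right (by omega)
      rw [hsplit]
      simp only [List.map_append, List.sum_append, List.map_cons, List.map_nil,
        List.sum_cons, List.sum_nil]
      have hrow := innerClosed ((k:Int)+1) n (by omega) (by omega)
      push_cast
      by_cases h : (k:Int)+1 ≤ n
      · rw [if_pos h]
        rw [if_pos (by omega : (k:Int) ≤ n)] at ih
        by_cases h' : n ≤ (k:Int)+1
        · have hn' : n = (k:Int)+1 := by omega
          subst hn'
          rw [if_pos le_rfl] at hrow
          linear_combination ih + hrow - q1_diag_glue (k:Int)
        · rw [if_neg h'] at hrow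
          linear_combination ih + hrow - q1_step (k:Int) n
      · rw [if_neg h]
        rw [if_pos (by omega : n ≤ (k:Int)+1)] at hrow
        by_cases h2 : (k:Int) ≤ n
        · have hn2 : n = (k:Int) := by omega
          subst hn2
          rw [if_pos le_rfl] at ih
          linear_combination ih + hrow - q2_succ_self (k:Int)
        · rw [if_neg h2] at ih
          linear_combination ih + hrow - q2_step (k:Int) n

theorem dgm_closed (m : Int) (n : Int) (hm : 1 ≤ m) (hn : 1 ≤ n) :
    180 * dgm m n = if m ≤ n then q1 m n else q1 n n + q2 m n := by
  rw [dgm_eq_sum]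
  obtain ⟨k, rfl⟩ : ∃ k : Nat, m = (k:Int) := ⟨m.toNat, by omega⟩
  exact outerClosedNat k n hn

theorem dgm_main (m : Int) (n : Int) : dgm m n = dgm_alt m n := by
  by_cases hm : m < 1 ∨ n < 1
  · have hz : dgm m n = 0 := by
      rw [dgm_eq_sum]
      rcases hm with h | h
      · rw [PySem.List.pyRange_one_eq_nil (by omega)]
        rfl
      · have hr : ∀ i : Int, rowSum i n = 0 := by
          intro i
          unfold rowSum
          rw [PySem.List.pyRange_one_eq_nil (by omega)]
          rfl
        simp [hr]
    rw [hz]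
    unfold dgm_alt
    rw [if_pos hm]
  · have hm1 : 1 ≤ m := by omega
    have hn1 : 1 ≤ n := by omega
    have hcl := dgm_closed m n hm1 hn1
    unfold dgm_alt
    rw [if_neg (by omega)]
    by_cases hmn : m ≥ n
    · simp only [if_pos hmn]
      rw [numB_eq m n]
      have hnum : q1 n n + q2 m n = 180 * dgm m n := by
        by_cases hle : m ≤ n
        · have he : m = n := by omega
          subst he
          rw [if_pos le_rfl] at hcl
          linear_combination -hcl + q2_self m
        · rw [if_neg hle] at hcl
          omega
      rw [hnum, PySem.Int.floordiv_eq_ediv_of_pos (by norm_num)]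
      exact (Int.mul_ediv_cancel_left _ (by norm_num)).symm
    · simp only [if_neg hmn]
      rw [numB_eq n m]
      have hnum : q1 m m + q2 n m = 180 * dgm m n := by
        rw [if_pos (by omega : m ≤ n)] at hcl
        linear_combination -hcl - q1_sym m n
      rw [hnum, PySem.Int.floordiv_eq_ediv_of_pos (by norm_num)]
      exact (Int.mul_ediv_cancel_left _ (by norm_num)).symm

-- ===== VERDICT (by name: the statement is the Claim_ definition above) =====
theorem dgm_spec : Claim_equal_dgm := by
  intro m n _
  unfold Spec_dgm
  exact dgm_main m n
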